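-- pv_equiv track=rewrite | github.com/LetaoZhao/RL | pyboy_environment/environments/pokemon/tasks/brock.py | get_1D_maps
-- ===== SOURCE A (Python) =====
-- def get_1D_maps(map_1,map_2):
--     result = []
--
--     height = len(map_1)
--     width = len(map_1[0])
--     # start_height = height//2 - 3
--     # start_width = width//2 - 3
--
--     for i1 in range(0,height):
--         for i2 in range(0,width):
--             result.append(map_1[i1][i2])
--             result.append(map_2[i1][i2])
--
--     return result
-- ===== SOURCE B (Python) =====
-- def get_1D_maps(map_1, map_2):
--     height = len(map_1)
--     width = len(map_1[0])
--     flat1 = [map_1[i][j] for i in range(height) for j in range(width)]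
--     flat2 = [map_2[i][j] for i in range(height) for j in range(width)]
--     result = []
--     for a, b in zip(flat1, flat2):
--         result.append(a)
--         result.append(b)
--     return result
-- ===== Notes on version B (the rewrite author's own statement) =====
-- stated objective: alternative
-- what changed: Replaces the single nested loop that appends map_1 and map_2 elements alternately with two independent flattening comprehensions over the same ranges followed by one zip-interleave pass.
import Mathlib
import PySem

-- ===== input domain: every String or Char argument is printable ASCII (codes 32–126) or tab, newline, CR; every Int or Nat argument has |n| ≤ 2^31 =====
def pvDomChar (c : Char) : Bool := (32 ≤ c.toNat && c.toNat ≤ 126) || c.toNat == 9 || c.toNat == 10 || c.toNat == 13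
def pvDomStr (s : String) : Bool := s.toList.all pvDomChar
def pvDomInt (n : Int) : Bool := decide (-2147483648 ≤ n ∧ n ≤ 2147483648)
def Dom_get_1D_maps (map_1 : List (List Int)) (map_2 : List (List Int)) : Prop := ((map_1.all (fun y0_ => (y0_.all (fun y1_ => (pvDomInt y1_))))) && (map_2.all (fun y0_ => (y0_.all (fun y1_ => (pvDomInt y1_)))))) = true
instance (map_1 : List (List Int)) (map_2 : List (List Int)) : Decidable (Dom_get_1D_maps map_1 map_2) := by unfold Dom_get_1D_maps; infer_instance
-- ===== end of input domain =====

-- B replaces A's single nested append-interleave loop by two independent flattening passes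
-- over the same ranges plus one final zip-interleave pass (objective: alternative decomposition).

-- ===== PORT A =====
-- literal transliteration: result accumulator, nested for-loops over range(0,height) × range(0,width),
-- two appends per inner step; out-of-range accesses (excluded by Pre_) read a default.
def get_1D_maps (map_1 : List (List Int)) (map_2 : List (List Int)) : List Int :=
  let height : Int := map_1.length
  let width : Int := (PySem.List.pyGetD map_1 0 []).length
  (PySem.List.pyRange 0 height 1).foldl (fun result i1 =>
    (PySem.List.pyRange 0 width 1).foldl (fun result i2 =>
      (result ++ [PySem.List.pyGetD (PySem.List.pyGetD map_1 i1 []) i2 0])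
        ++ [PySem.List.pyGetD (PySem.List.pyGetD map_2 i1 []) i2 0]) result) []

-- ===== PORT B =====
-- literal transliteration of Source B: two flattened comprehensions, then a foldr interleave of their zip.
def get_1D_maps_alt (map_1 : List (List Int)) (map_2 : List (List Int)) : List Int :=
  let height : Int := map_1.length
  let width : Int := (PySem.List.pyGetD map_1 0 []).length
  let flat1 : List Int := (PySem.List.pyRange 0 height 1).flatMap (fun i =>
    (PySem.List.pyRange 0 width 1).map (fun j =>
      PySem.List.pyGetD (PySem.List.pyGetD map_1 i []) j 0))
  let flat2 : List Int := (PySem.List.pyRange 0 height 1).flatMap (fun i =>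
    (PySem.List.pyRange 0 width 1).map (fun j =>
      PySem.List.pyGetD (PySem.List.pyGetD map_2 i []) j 0))
  (flat1.zip flat2).foldr (fun p acc => p.1 :: p.2 :: acc) []

-- ===== PRECONDITION & SPEC =====
-- Pre_ excludes exactly the inputs where the Python A raises IndexError: empty map_1 (map_1[0]),
-- and — when width > 0 — a map_2 shorter than map_1 or any accessed row shorter than width.
def Pre_get_1D_maps (map_1 : List (List Int)) (map_2 : List (List Int)) : Prop :=
  map_1 ≠ [] ∧
  (0 < (map_1.headD []).length →
    map_1.length ≤ map_2.length ∧
    (∀ r ∈ map_1, (map_1.headD []).length ≤ r.length) ∧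
    (∀ r ∈ map_2.take map_1.length, (map_1.headD []).length ≤ r.length))
instance (map_1 : List (List Int)) (map_2 : List (List Int)) : Decidable (Pre_get_1D_maps map_1 map_2) := by unfold Pre_get_1D_maps; infer_instance
def pvWitness_get_1D_maps : List (List Int) × List (List Int) := ([[1, 2], [3, 4]], [[5, 6], [7, 8]])

def Spec_get_1D_maps (map_1 : List (List Int)) (map_2 : List (List Int)) (out : List Int) : Prop := out = get_1D_maps_alt map_1 map_2
instance (map_1 : List (List Int)) (map_2 : List (List Int)) (out : List Int) : Decidable (Spec_get_1D_maps map_1 map_2 out) := by unfold Spec_get_1D_maps; infer_instance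

-- ===== CLAIM (what is proved, stated in full; the proofs are below) =====
def Claim_equal_get_1D_maps : Prop := ∀ (map_1 : List (List Int)) (map_2 : List (List Int)), Dom_get_1D_maps map_1 map_2 → Pre_get_1D_maps map_1 map_2 → Spec_get_1D_maps map_1 map_2 (get_1D_maps map_1 map_2)

-- ===== LEMMAS AND PROOFS =====

-- interleaving the zip of two maps over the same list is the flatMap of the two-element blocks
theorem pv_interleave_zip_map {α : Type} (l : List α) (f g : α → Int) :
    ((l.map f).zip (l.map g)).foldr (fun p acc => p.1 :: p.2 :: acc) [] =
      l.flatMap (fun x => [f x, g x]) := by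
  induction l with
  | nil => rfl
  | cons x t ih => simp [List.flatMap_cons, ih]

-- A's nested append loop, flattened to a flatMap over the outer range
theorem pv_A_flatMap (R1 R2 : List Int) (f g : Int → Int → Int) (acc : List Int) :
    R1.foldl (fun result i1 =>
      R2.foldl (fun result i2 => (result ++ [f i1 i2]) ++ [g i1 i2]) result) acc =
      acc ++ R1.flatMap (fun i1 => R2.flatMap (fun i2 => [f i1 i2, g i1 i2])) := by
  induction R1 generalizing acc with
  | nil => simp
  | cons i t ih =>
      simp only [List.foldl_cons, List.flatMap_cons, ih]
      have : ∀ (a : List Int),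
          R2.foldl (fun result i2 => (result ++ [f i i2]) ++ [g i i2]) a =
            a ++ R2.flatMap (fun i2 => [f i i2, g i i2]) := by
        intro a
        have := PySem.List.foldl_append_eq_flatMap (l := R2)
          (g := fun i2 => [f i i2, g i i2]) (acc := a)
        simpa [List.append_assoc] using this
      rw [this, List.append_assoc]

-- B's two flattened lists interleave to the same nested flatMap
theorem pv_B_flatMap (R1 R2 : List Int) (f g : Int → Int → Int) :
    ((R1.flatMap fun i => R2.map (f i)).zip (R1.flatMap fun i => R2.map (g i))).foldr
        (fun p acc => p.1 :: p.2 :: acc) [] =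
      R1.flatMap (fun i1 => R2.flatMap (fun i2 => [f i1 i2, g i1 i2])) := by
  have h1 : (R1.flatMap fun i => R2.map (f i)) =
      (R1.flatMap fun i => R2.map (Prod.mk i)).map (fun p => f p.1 p.2) := by
    simp [List.map_flatMap, List.map_map, Function.comp_def]
  have h2 : (R1.flatMap fun i => R2.map (g i)) =
      (R1.flatMap fun i => R2.map (Prod.mk i)).map (fun p => g p.1 p.2) := by
    simp [List.map_flatMap, List.map_map, Function.comp_def]
  rw [h1, h2, pv_interleave_zip_map]
  simp [List.flatMap_assoc, List.flatMap_map]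

-- ===== VERDICT (by name: the statement is the Claim_ definition above) =====
theorem get_1D_maps_spec : Claim_equal_get_1D_maps := by
  intro map_1 map_2 _ _
  unfold Spec_get_1D_maps get_1D_maps get_1D_maps_alt
  rw [pv_A_flatMap, pv_B_flatMap]
  simp
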